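-- pv_equiv track=rewrite | github.com/ththarkonen/advent-of-code-2024 | day23/networklib.py | parse
-- ===== SOURCE A (Python) =====
-- def parse( lines ):
--
--     connections = {}
--
--     for line in lines:
--
--         line = line.replace("\n","")
--         line = line.split("-")
--
--         A = line[0]
--         B = line[1]
--
--         if A not in connections:
--             connections[A] = [B]
--         if B not in connections:
--             connections[B] = [A]
--         if A in connections and B not in connections[A]:
--             connections[A].append( B )
--         if B in connections and A not in connections[B]:
--             connections[B].append( A )
--
--     return connections
-- ===== SOURCE B (Python) =====
-- def parse(lines):
--     connections = {}
--     for line in lines: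
--         parts = line.replace("\n", "").split("-")
--         a = parts[0]
--         b = parts[1]
--         connections.setdefault(a, []).append(b)
--         connections.setdefault(b, []).append(a)
--     return {node: list(dict.fromkeys(nbrs)) for node, nbrs in connections.items()}
-- ===== Notes on version B (the rewrite author's own statement) =====
-- stated objective: alternative
-- what changed: Replaces A's four per-edge conditional membership/insert branches by an unconditional two-pass build: append both endpoints to setdefault lists (duplicates allowed), then dedup every neighbor list once with dict.fromkeys, preserving first-occurrence order.
import Mathlib
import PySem

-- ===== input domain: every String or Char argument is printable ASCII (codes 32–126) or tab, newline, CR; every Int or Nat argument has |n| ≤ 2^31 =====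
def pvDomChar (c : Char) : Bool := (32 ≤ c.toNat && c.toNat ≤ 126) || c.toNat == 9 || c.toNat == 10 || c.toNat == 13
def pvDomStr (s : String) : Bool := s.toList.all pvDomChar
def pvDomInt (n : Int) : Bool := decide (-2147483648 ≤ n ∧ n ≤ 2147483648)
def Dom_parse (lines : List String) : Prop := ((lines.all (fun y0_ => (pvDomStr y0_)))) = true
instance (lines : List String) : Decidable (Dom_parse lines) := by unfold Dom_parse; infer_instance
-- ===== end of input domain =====

-- B builds the adjacency dict by one unconditional setdefault-append pass over the edges and
-- dedups every neighbor list once at the end, instead of A's four per-edge conditional branches.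


-- ===== PORT A =====
def parseStepA (connections : PySem.Dict String (List String)) (line : String) :
    PySem.Dict String (List String) :=
  let line1 := PySem.Str.replace line "\n" ""
  let parts := (PySem.Str.split? line1 "-").getD []   -- sep "-" is nonempty, so split? is always `some`
  match PySem.List.pyGet? parts 0, PySem.List.pyGet? parts 1 with
  | some A, some B =>
      let c1 := if connections.contains A = false then connections.insert A [B] else connections
      let c2 := if c1.contains B = false then c1.insert B [A] else c1
      let c3 := if c2.contains A && !((c2.getD A []).contains B)
                then c2.modify A [] (· ++ [B]) else c2
      let c4 := if c3.contains B && !((c3.getD B []).contains A)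
                then c3.modify B [] (· ++ [A]) else c3
      c4
  | _, _ => connections   -- Python raises IndexError here (line without "-"): excluded by Pre_parse

def parse (lines : List String) : List (String × List String) :=
  (lines.foldl parseStepA PySem.Dict.empty).items

-- ===== PORT B =====
def parseStepB (connections : PySem.Dict String (List String)) (line : String) :
    PySem.Dict String (List String) :=
  let parts := (PySem.Str.split? (PySem.Str.replace line "\n" "") "-").getD []
  match PySem.List.pyGet? parts 0, PySem.List.pyGet? parts 1 with
  | some a, some b =>
      (connections.modify a [] (· ++ [b])).modify b [] (· ++ [a])
  | _, _ => connections   -- Python raises IndexError here (line without "-"): excluded by Pre_parse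

def parse_alt (lines : List String) : List (String × List String) :=
  ((lines.foldl parseStepB PySem.Dict.empty).items).map (fun p => (p.1, PySem.List.dedup p.2))

-- ===== PRECONDITION & SPEC =====
-- Pre_parse: every line contains a '-'; on a line without one both Pythons raise IndexError.
def Pre_parse (lines : List String) : Prop :=
  (lines.all (fun l => PySem.Str.isIn "-" l)) = true
instance (lines : List String) : Decidable (Pre_parse lines) := by unfold Pre_parse; infer_instance
def pvWitness_parse : List String := ["kh-tc", "qp-kh", "de-cg"]

def Spec_parse (lines : List String) (out : List (String × List String)) : Prop := out = parse_alt lines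
instance (lines : List String) (out : List (String × List String)) : Decidable (Spec_parse lines out) := by unfold Spec_parse; infer_instance

-- ===== CLAIM (what is proved, stated in full; the proofs are below) =====
def Claim_equal_parse : Prop := ∀ (lines : List String), Dom_parse lines → Pre_parse lines → Spec_parse lines (parse lines)

-- ===== LEMMAS AND PROOFS =====

-- dedupD d: d with every value list deduped (first occurrences kept)
def dedupD (d : PySem.Dict String (List String)) : PySem.Dict String (List String) :=
  ⟨d.items.map (fun p => (p.1, PySem.List.dedup p.2))⟩

theorem contains_dedupD (d : PySem.Dict String (List String)) (k : String) :
    (dedupD d).contains k = d.contains k := by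
  simp [dedupD, PySem.Dict.contains, List.any_map, Function.comp_def]

theorem get?_dedupD (d : PySem.Dict String (List String)) (k : String) :
    (dedupD d).get? k = (d.get? k).map PySem.List.dedup := by
  simp [dedupD, PySem.Dict.get?, List.find?_map, Function.comp_def, Option.map_map]

theorem getD_dedupD (d : PySem.Dict String (List String)) (k : String) :
    (dedupD d).getD k [] = PySem.List.dedup (d.getD k []) := by
  simp only [PySem.Dict.getD, get?_dedupD]
  cases d.get? k <;> simp [PySem.List.dedup, PySem.Set.ofList]

theorem dedupD_insert (d : PySem.Dict String (List String)) (k : String) (v : List String) :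
    dedupD (d.insert k v) = (dedupD d).insert k (PySem.List.dedup v) := by
  apply PySem.Dict.ext
  simp only [PySem.Dict.insert, contains_dedupD]
  by_cases hc : d.contains k = true <;>
    simp [hc, dedupD, List.map_map, Function.comp_def] <;>
    · intro a b _
      by_cases hp : a = k <;> simp [hp]

theorem nodup_keys_dedupD (d : PySem.Dict String (List String)) (h : d.keys.Nodup) :
    (dedupD d).keys.Nodup := by
  simpa [dedupD, PySem.Dict.keys, List.map_map, Function.comp_def] using h

theorem dedup_append_singleton (l : List String) (x : String) :
    PySem.List.dedup (l ++ [x]) =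
      if x ∈ l then PySem.List.dedup l else PySem.List.dedup l ++ [x] := by
  simp [PySem.List.dedup_eq_ofList, PySem.Set.ofList_append_singleton, PySem.Set.add_eq_ite,
    PySem.Set.mem_ofList]

theorem insert_getD_self (d : PySem.Dict String (List String)) (k : String)
    (h : d.keys.Nodup) (hc : d.contains k = true) :
    d.insert k (d.getD k []) = d := by
  apply PySem.Dict.ext
  rw [PySem.Dict.items_insert_of_contains _ _ hc]
  have hid : ∀ p ∈ d.items, (fun p => if (p.1 == k) = true then (k, d.getD k []) else p) p = id p := by
    intro p hp
    by_cases hk : p.1 == k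
    · have hk' : p.1 = k := by simpa using hk
      have hv : d.getD k [] = p.2 := by
        subst hk'
        exact PySem.Dict.getD_of_mem_items d (by exact hp) h []
      have hpe : (k, d.getD k []) = p := by rw [hv, ← hk']
      simpa [hk] using hpe
    · simp [hk]
  rw [List.map_congr_left hid, List.map_id]

theorem insert_comm_left (d : PySem.Dict String (List String)) {a b : String}
    (hab : a ≠ b) (hc : d.contains a = true) (v w : List String) :
    (d.insert b w).insert a v = (d.insert a v).insert b w := by
  apply PySem.Dict.ext
  have hca' : (d.insert b w).contains a = true := by
    simp [PySem.Dict.contains_insert, hc]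
  by_cases hcb : d.contains b = true
  · have hcb' : (d.insert a v).contains b = true := by
      simp [PySem.Dict.contains_insert, hcb]
    rw [PySem.Dict.items_insert_of_contains _ _ hca',
        PySem.Dict.items_insert_of_contains _ _ hcb',
        PySem.Dict.items_insert_of_contains _ _ hcb,
        PySem.Dict.items_insert_of_contains _ _ hc,
        List.map_map, List.map_map]
    apply List.map_congr_left
    intro p _
    by_cases hpa : p.1 = a <;> by_cases hpb : p.1 = b <;>
      simp [hpa, hpb, hab, Ne.symm hab]
  · have hcb'' : (d.insert a v).contains b = false := by
      rw [PySem.Dict.contains_insert]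
      simp [Ne.symm hab]
      simpa using hcb
    rw [PySem.Dict.items_insert_of_contains _ _ hca',
        PySem.Dict.items_insert_of_not_contains _ _ (by simpa using hcb),
        PySem.Dict.items_insert_of_not_contains _ _ hcb'',
        PySem.Dict.items_insert_of_contains _ _ hc]
    simp [Ne.symm hab]

theorem insert_noop (e : PySem.Dict String (List String)) (k : String) (v : List String)
    (h : e.keys.Nodup) (hc : e.contains k = true) (hv : e.getD k [] = v) :
    e.insert k v = e := by
  rw [← hv]; exact insert_getD_self e k h hc

theorem stepAB_core (d : PySem.Dict String (List String)) (h : d.keys.Nodup) (a b : String) :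
    (let c1 := if (dedupD d).contains a = false then (dedupD d).insert a [b] else dedupD d
     let c2 := if c1.contains b = false then c1.insert b [a] else c1
     let c3 := if c2.contains a && !((c2.getD a []).contains b)
               then c2.modify a [] (· ++ [b]) else c2
     if c3.contains b && !((c3.getD b []).contains a)
     then c3.modify b [] (· ++ [a]) else c3)
    = dedupD ((d.modify a [] (· ++ [b])).modify b [] (· ++ [a])) := by
  simp only [PySem.Dict.modify]
  by_cases hab : a = b
  · subst hab
    rw [PySem.Dict.getD_insert_self, PySem.Dict.insert_insert_self, dedupD_insert]
    have hr : PySem.List.dedup (d.getD a [] ++ [a] ++ [a])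
        = if a ∈ d.getD a [] then PySem.List.dedup (d.getD a [])
          else PySem.List.dedup (d.getD a []) ++ [a] := by
      rw [dedup_append_singleton (d.getD a [] ++ [a]) a, if_pos (by simp),
          dedup_append_singleton]
    rw [hr]
    by_cases hca : d.contains a = true
    · by_cases hava : a ∈ d.getD a []
      · conv_rhs => rw [if_pos hava,
          insert_noop _ _ _ (nodup_keys_dedupD d h)
            (by rw [contains_dedupD]; exact hca) (by rw [getD_dedupD])]
        simp [contains_dedupD, hca, getD_dedupD, List.contains_iff_mem,
          PySem.List.mem_dedup, hava]
      · conv_rhs => rw [if_neg hava]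
        simp [contains_dedupD, hca, getD_dedupD, List.contains_iff_mem,
          PySem.List.mem_dedup, hava, PySem.Dict.modify, PySem.Dict.getD_insert,
          PySem.Dict.contains_insert]
    · have hca' : d.contains a = false := by simpa using hca
      have hva : d.getD a [] = [] := PySem.Dict.getD_of_not_contains d [] hca'
      conv_rhs => rw [if_neg (by simp [hva])]
      simp [contains_dedupD, hca', hva, PySem.Dict.modify, PySem.Dict.getD_insert,
        PySem.Dict.contains_insert, List.contains_iff_mem, PySem.Set.ofList_nil]
  · -- a ≠ b
    have hgb : (d.insert a (d.getD a [] ++ [b])).getD b [] = d.getD b [] :=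
      PySem.Dict.getD_insert_of_ne _ _ _ (Ne.symm hab)
    rw [hgb, dedupD_insert, dedupD_insert, dedup_append_singleton, dedup_append_singleton]
    by_cases hca : d.contains a = true
    · by_cases hcb : d.contains b = true
      · by_cases hbva : b ∈ d.getD a []
        · by_cases havb : a ∈ d.getD b []
          · conv_rhs => rw [if_pos hbva, if_pos havb,
              insert_noop _ _ _ (nodup_keys_dedupD d h)
                (by rw [contains_dedupD]; exact hca) (by rw [getD_dedupD]),
              insert_noop _ _ _ (nodup_keys_dedupD d h)
                (by rw [contains_dedupD]; exact hcb) (by rw [getD_dedupD])]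
            simp [contains_dedupD, hca, hcb, getD_dedupD, List.contains_iff_mem,
              PySem.List.mem_dedup, hbva, havb]
          · conv_rhs => rw [if_pos hbva, if_neg havb,
              insert_noop _ _ _ (nodup_keys_dedupD d h)
                (by rw [contains_dedupD]; exact hca) (by rw [getD_dedupD])]
            simp [contains_dedupD, hca, hcb, getD_dedupD, List.contains_iff_mem,
              PySem.List.mem_dedup, hbva, havb, PySem.Dict.modify]
        · by_cases havb : a ∈ d.getD b []
          · conv_rhs => rw [if_neg hbva, if_pos havb,
              insert_noop _ _ _
                (PySem.Dict.nodup_keys_insert _ _ _ (nodup_keys_dedupD d h))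
                (by rw [PySem.Dict.contains_insert, contains_dedupD, hcb]; simp)
                (by rw [PySem.Dict.getD_insert_of_ne _ _ _ (Ne.symm hab), getD_dedupD])]
            simp [contains_dedupD, hca, hcb, getD_dedupD, List.contains_iff_mem,
              PySem.List.mem_dedup, hbva, havb, PySem.Dict.modify,
              PySem.Dict.contains_insert, PySem.Dict.getD_insert, hab, Ne.symm hab]
          · conv_rhs => rw [if_neg hbva, if_neg havb]
            simp [contains_dedupD, hca, hcb, getD_dedupD, List.contains_iff_mem,
              PySem.List.mem_dedup, hbva, havb, PySem.Dict.modify,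
              PySem.Dict.contains_insert, PySem.Dict.getD_insert, hab, Ne.symm hab]
      · have hcb' : d.contains b = false := by simpa using hcb
        have hvb : d.getD b [] = [] := PySem.Dict.getD_of_not_contains d [] hcb'
        by_cases hbva : b ∈ d.getD a []
        · conv_rhs => rw [if_pos hbva, if_neg (by simp [hvb]),
            insert_noop _ _ _ (nodup_keys_dedupD d h)
              (by rw [contains_dedupD]; exact hca) (by rw [getD_dedupD])]
          simp [contains_dedupD, hca, hcb', hvb, getD_dedupD, List.contains_iff_mem,
            PySem.List.mem_dedup, hbva, PySem.Dict.modify, PySem.Dict.contains_insert,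
            PySem.Dict.getD_insert, hab, Ne.symm hab, PySem.Set.ofList_nil]
        · conv_rhs => rw [if_neg hbva, if_neg (by simp [hvb]),
            ← insert_comm_left (dedupD d) hab
               (by rw [contains_dedupD]; exact hca)
               (PySem.List.dedup (d.getD a []) ++ [b]) (PySem.List.dedup (d.getD b []) ++ [a])]
          simp [contains_dedupD, hca, hcb', hvb, getD_dedupD, List.contains_iff_mem,
            PySem.List.mem_dedup, hbva, PySem.Dict.modify, PySem.Dict.contains_insert,
            PySem.Dict.getD_insert, hab, Ne.symm hab, PySem.Set.ofList_nil]
    · have hca' : d.contains a = false := by simpa using hca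
      have hva : d.getD a [] = [] := PySem.Dict.getD_of_not_contains d [] hca'
      conv_rhs => rw [if_neg (by simp [hva])]
      by_cases hcb : d.contains b = true
      · by_cases havb : a ∈ d.getD b []
        · conv_rhs => rw [if_pos havb,
            insert_noop _ _ _
              (PySem.Dict.nodup_keys_insert _ _ _ (nodup_keys_dedupD d h))
              (by rw [PySem.Dict.contains_insert, contains_dedupD, hcb]; simp)
              (by rw [PySem.Dict.getD_insert_of_ne _ _ _ (Ne.symm hab), getD_dedupD])]
          simp [contains_dedupD, hca', hcb, hva, getD_dedupD, List.contains_iff_mem,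
            PySem.List.mem_dedup, havb, PySem.Dict.modify, PySem.Dict.contains_insert,
            PySem.Dict.getD_insert, hab, Ne.symm hab, PySem.Set.ofList_nil]
        · conv_rhs => rw [if_neg havb]
          simp [contains_dedupD, hca', hcb, hva, getD_dedupD, List.contains_iff_mem,
            PySem.List.mem_dedup, havb, PySem.Dict.modify, PySem.Dict.contains_insert,
            PySem.Dict.getD_insert, hab, Ne.symm hab, PySem.Set.ofList_nil]
      · have hcb' : d.contains b = false := by simpa using hcb
        have hvb : d.getD b [] = [] := PySem.Dict.getD_of_not_contains d [] hcb'
        conv_rhs => rw [if_neg (by simp [hvb])]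
        simp [contains_dedupD, hca', hcb', hva, hvb, PySem.Dict.modify,
          PySem.Dict.contains_insert, PySem.Dict.getD_insert, List.contains_iff_mem,
          hab, Ne.symm hab, PySem.Set.ofList_nil]

theorem stepA_dedup_stepB (line : String) (d : PySem.Dict String (List String))
    (h : d.keys.Nodup) :
    parseStepA (dedupD d) line = dedupD (parseStepB d line) := by
  unfold parseStepA parseStepB
  simp only []
  cases h0 : PySem.List.pyGet? ((PySem.Str.split? (PySem.Str.replace line "\n" "") "-").getD []) 0 with
  | none =>
      cases h1 : PySem.List.pyGet? ((PySem.Str.split? (PySem.Str.replace line "\n" "") "-").getD []) 1 <;>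
        simp only [h0]
  | some a =>
      cases h1 : PySem.List.pyGet? ((PySem.Str.split? (PySem.Str.replace line "\n" "") "-").getD []) 1 with
      | none => simp only [h1]
      | some b =>
          simp only [h0, h1]
          exact stepAB_core d h a b

theorem nodup_keys_stepB (d : PySem.Dict String (List String)) (line : String)
    (h : d.keys.Nodup) : (parseStepB d line).keys.Nodup := by
  unfold parseStepB
  simp only [PySem.Dict.modify]
  cases PySem.List.pyGet? ((PySem.Str.split? (PySem.Str.replace line "\n" "") "-").getD []) 0 <;>
    cases PySem.List.pyGet? ((PySem.Str.split? (PySem.Str.replace line "\n" "") "-").getD []) 1 <;>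
    first
      | exact h
      | exact PySem.Dict.nodup_keys_insert _ _ _ (PySem.Dict.nodup_keys_insert _ _ _ h)

theorem foldl_stepA_stepB (ls : List String) (d : PySem.Dict String (List String))
    (h : d.keys.Nodup) :
    ls.foldl parseStepA (dedupD d) = dedupD (ls.foldl parseStepB d) := by
  induction ls generalizing d with
  | nil => rfl
  | cons l ls ih =>
      simp only [List.foldl_cons]
      rw [stepA_dedup_stepB l d h, ih _ (nodup_keys_stepB d l h)]

-- ===== VERDICT (by name: the statement is the Claim_ definition above) =====
theorem parse_spec : Claim_equal_parse := by
  intro lines _ _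
  unfold Spec_parse parse parse_alt
  have h0 : (PySem.Dict.empty : PySem.Dict String (List String)) = dedupD PySem.Dict.empty := rfl
  rw [h0, foldl_stepA_stepB lines PySem.Dict.empty PySem.Dict.nodup_keys_empty]
  rfl
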